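-- pv_equiv track=rewrite | github.com/Arsen1302/Code-copy-detector | TestData/solutions/problem_103_4_1.py | solution_103_4_1
-- ===== SOURCE A (Python) =====
-- from typing import List
--
-- def solution_103_4_1(k: int, n: int) -> List[List[int]]:
--     def solution_103_4_2(digit, start_num, cur, cur_sum):
--         if cur_sum == n and digit == k: ans.append(cur[:])
--         elif digit >= k or cur_sum > n: return
--         else:
--             for i in range(start_num+1, 10):
--                 cur.append(i)
--                 solution_103_4_2(digit+1, i, cur, cur_sum+i)
--                 cur.pop()
--     ans = list()
--     solution_103_4_2(0, 0, [], 0)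
--     return ans
-- ===== SOURCE B (Python) =====
-- from itertools import combinations
--
-- def solution_103_4_1(k, n):
--     if not 0 <= k <= 9:
--         return []
--     return [list(c) for c in combinations(range(1, 10), k) if sum(c) == n]
-- ===== Notes on version B (the rewrite author's own statement) =====
-- stated objective: simpler
-- what changed: Replaces the recursive backtracking with a mutable path and sum/depth pruning by a direct enumeration of itertools.combinations(range(1,10), k) filtered by sum, keeping the same lexicographic order.
import Mathlib
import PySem

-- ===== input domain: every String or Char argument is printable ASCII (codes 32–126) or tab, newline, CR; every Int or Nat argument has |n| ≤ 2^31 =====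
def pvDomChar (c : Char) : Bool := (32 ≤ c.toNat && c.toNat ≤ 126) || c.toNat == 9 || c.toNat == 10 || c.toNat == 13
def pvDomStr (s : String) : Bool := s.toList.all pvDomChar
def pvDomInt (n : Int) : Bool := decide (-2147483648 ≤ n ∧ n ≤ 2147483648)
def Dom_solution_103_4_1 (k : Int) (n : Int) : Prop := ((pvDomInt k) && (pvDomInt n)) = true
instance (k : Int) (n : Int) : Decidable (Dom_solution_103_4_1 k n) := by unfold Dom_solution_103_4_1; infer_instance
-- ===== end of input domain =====

-- B replaces A's pruned backtracking over a mutable path by a plain enumeration of the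
-- k-combinations of 1..9 filtered by sum (objective: simpler); return values agree on all inputs.

-- ===== PORT A =====
-- Inner recursion solution_103_4_2: on every input the Python recursion depth is at most 11
-- (start_num strictly increases through 1..9 and a recursive call needs start_num ≤ 8),
-- so structural recursion on a fuel of 11 reproduces the Python exactly.
def solution_103_4_2 (k n : Int) (fuel : Nat) (digit start_num : Int)
    (cur : List Int) (cur_sum : Int) : List (List Int) :=
  match fuel with
  | 0 => []  -- never reached from the top-level call (fuel 11 exceeds the maximal depth)
  | fuel + 1 =>
    if cur_sum = n ∧ digit = k then [cur]
    else if digit ≥ k ∨ cur_sum > n then []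
    else (PySem.List.pyRange (start_num + 1) 10 1).foldl
      (fun acc i => acc ++ solution_103_4_2 k n fuel (digit + 1) i (cur ++ [i]) (cur_sum + i)) []

def solution_103_4_1 (k : Int) (n : Int) : List (List Int) :=
  solution_103_4_2 k n 11 0 0 [] 0

-- ===== PORT B =====
-- itertools.combinations(l, m) in lexicographic order (the standard-library call Source B makes)
def pyCombinations (m : Nat) (l : List Int) : List (List Int) :=
  match m, l with
  | 0, _ => [[]]
  | _ + 1, [] => []
  | m + 1, x :: xs => (pyCombinations m xs).map (fun c => x :: c) ++ pyCombinations (m + 1) xs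

def solution_103_4_1_alt (k : Int) (n : Int) : List (List Int) :=
  if k < 0 ∨ 9 < k then []
  else (pyCombinations k.toNat (PySem.List.pyRange 1 10 1)).filter (fun c => c.sum == n)

-- ===== PRECONDITION & SPEC =====
def Spec_solution_103_4_1 (k : Int) (n : Int) (out : List (List Int)) : Prop := out = solution_103_4_1_alt k n
instance (k : Int) (n : Int) (out : List (List Int)) : Decidable (Spec_solution_103_4_1 k n out) := by unfold Spec_solution_103_4_1; infer_instance

-- ===== CLAIM (what is proved, stated in full; the proofs are below) =====
def Claim_equal_solution_103_4_1 : Prop := ∀ (k : Int) (n : Int), Dom_solution_103_4_1 k n → Spec_solution_103_4_1 k n (solution_103_4_1 k n)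

-- ===== LEMMAS AND PROOFS =====

-- every m-combination of a list of elements ≥ 1 has sum ≥ m
lemma sum_ge_of_mem_pyCombinations (l : List Int) (hl : ∀ x ∈ l, 1 ≤ x) :
    ∀ (m : Nat) (c : List Int), c ∈ pyCombinations m l → (m : Int) ≤ c.sum := by
  induction l with
  | nil =>
    intro m c hc
    cases m with
    | zero => simp [pyCombinations] at hc; simp [hc]
    | succ m => simp [pyCombinations] at hc
  | cons x xs ih =>
    intro m c hc
    cases m with
    | zero => simp [pyCombinations] at hc; simp [hc]
    | succ m =>
      simp only [pyCombinations, List.mem_append, List.mem_map] at hc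
      have hxs : ∀ y ∈ xs, 1 ≤ y := fun y hy => hl y (List.mem_cons_of_mem _ hy)
      rcases hc with ⟨c', hc', rfl⟩ | hc
      · have h1 := ih hxs m c' hc'
        have hx := hl x List.mem_cons_self
        simp only [List.sum_cons]
        push_cast
        omega
      · have h1 := ih hxs (m + 1) c hc
        omega

-- the for-loop of A, expressed on the range list, enumerates exactly the filtered combinations
lemma inner_loop (k n : Int) (fuel : Nat) (digit s : Int) (cur : List Int) (m' : Nat)
    (hm : (k - (digit + 1)).toNat = m')
    (IH : ∀ (st dg : Int) (c : List Int) (t : Int), 0 ≤ st → dg ≤ k → (10 - st).toNat < fuel →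
        solution_103_4_2 k n fuel dg st c t =
          ((pyCombinations (k - dg).toNat (PySem.List.pyRange (st + 1) 10 1)).filter
              (fun cc => t + cc.sum == n)).map (fun cc => c ++ cc))
    (hdk : digit + 1 ≤ k) :
    ∀ (d : Nat) (a : Int), (10 - a).toNat = d → 1 ≤ a → (10 - a).toNat < fuel →
      (PySem.List.pyRange a 10 1).flatMap
          (fun i => solution_103_4_2 k n fuel (digit + 1) i (cur ++ [i]) (s + i)) =
        ((pyCombinations (m' + 1) (PySem.List.pyRange a 10 1)).filter
            (fun c => s + c.sum == n)).map (fun c => cur ++ c) := by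
  intro d
  induction d with
  | zero =>
    intro a ha _ _
    have h10 : (10:Int) ≤ a := by omega
    rw [PySem.List.pyRange_one_eq_nil h10]
    simp [pyCombinations]
  | succ d ihd =>
    intro a ha ha1 haf
    have hlt : a < 10 := by omega
    rw [PySem.List.pyRange_one_cons hlt]
    have hrec : (10 - (a + 1)).toNat = d := by omega
    have hrecf : (10 - (a + 1)).toNat < fuel := by omega
    have hhead := IH a (digit + 1) (cur ++ [a]) (s + a) (by omega) hdk haf
    rw [hm] at hhead
    simp only [List.flatMap_cons, hhead, ihd (a + 1) hrec (by omega) hrecf]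
    show _ = (((pyCombinations m' _).map _ ++ pyCombinations (m' + 1) _).filter _).map _
    rw [List.filter_append, List.map_append, List.filter_map, List.map_map]
    congr 1
    have hf : ((fun c : List Int => cur ++ c) ∘ fun c => a :: c)
        = fun c : List Int => cur ++ [a] ++ c := by funext c; simp
    rw [hf]
    congr 1
    apply List.filter_congr
    intro c _
    simp only [Function.comp, List.sum_cons]
    rw [show s + (a + c.sum) = s + a + c.sum from by ring]

-- characterisation of A's recursion as filtered combinations of the remaining digits
lemma go_eq (k n : Int) :
    ∀ (fuel : Nat) (start digit : Int) (cur : List Int) (s : Int),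
      0 ≤ start → digit ≤ k → (10 - start).toNat < fuel →
      solution_103_4_2 k n fuel digit start cur s =
        ((pyCombinations (k - digit).toNat (PySem.List.pyRange (start + 1) 10 1)).filter
            (fun c => s + c.sum == n)).map (fun c => cur ++ c) := by
  intro fuel
  induction fuel with
  | zero => intro start digit cur s _ _ h; omega
  | succ fuel ih =>
    intro start digit cur s hst hdk hf
    by_cases hdq : digit = k
    · subst hdq
      by_cases hs : s = n
      · simp [solution_103_4_2, hs, pyCombinations]
      · simp [solution_103_4_2, hs, pyCombinations]
    · have hlt : digit < k := lt_of_le_of_ne hdk hdq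
      have hm : (k - digit).toNat = (k - (digit + 1)).toNat + 1 := by omega
      by_cases hsn : n < s
      · have hfe : ((pyCombinations (k - digit).toNat
            (PySem.List.pyRange (start + 1) 10 1)).filter (fun c => s + c.sum == n)) = [] := by
          rw [List.filter_eq_nil_iff]
          intro c hc
          have hpos : ∀ x ∈ PySem.List.pyRange (start + 1) 10 1, 1 ≤ x := by
            intro x hx
            rw [PySem.List.mem_pyRange_one] at hx
            omega
          have hcs := sum_ge_of_mem_pyCombinations _ hpos _ c hc
          rw [hm] at hcs
          have : s + c.sum ≠ n := by push_cast at hcs; omega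
          simp [this]
        rw [hfe]
        have hc1 : ¬ (s = n ∧ digit = k) := fun h => absurd h.1 (by omega)
        have hc2 : digit ≥ k ∨ s > n := Or.inr (by omega)
        rw [solution_103_4_2, if_neg hc1, if_pos hc2]
        simp
      · have hcond1 : ¬ (s = n ∧ digit = k) := fun h => hdq h.2
        have hcond2 : ¬ (digit ≥ k ∨ s > n) := by omega
        rw [solution_103_4_2]
        rw [if_neg hcond1, if_neg hcond2]
        rw [PySem.List.foldl_append_eq_flatMap]
        rw [List.nil_append, hm]
        by_cases h9 : start + 1 < 10
        · exact inner_loop k n fuel digit s cur _ rfl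
            (fun st dg c t h1 h2 h3 => ih st dg c t h1 h2 h3) hlt
            (10 - (start + 1)).toNat (start + 1) rfl (by omega) (by omega)
        · rw [PySem.List.pyRange_one_eq_nil (by omega)]
          simp [pyCombinations]

-- no m-combination exists once m exceeds the length of the pool
lemma pyCombinations_eq_nil_of_lt (l : List Int) :
    ∀ (m : Nat), l.length < m → pyCombinations m l = [] := by
  induction l with
  | nil => intro m hm; cases m with
    | zero => simp at hm
    | succ m => rfl
  | cons x xs ih =>
    intro m hm
    cases m with
    | zero => simp at hm
    | succ m =>
      simp only [List.length_cons] at hm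
      simp [pyCombinations, ih m (by omega), ih (m + 1) (by omega)]

-- ===== VERDICT (by name: the statement is the Claim_ definition above) =====
theorem solution_103_4_1_spec : Claim_equal_solution_103_4_1 := by
  unfold Claim_equal_solution_103_4_1
  intro k n _
  unfold Spec_solution_103_4_1 solution_103_4_1 solution_103_4_1_alt
  by_cases hk : k < 0
  · rw [if_pos (Or.inl hk)]
    have h1 : ¬ ((0:Int) = n ∧ (0:Int) = k) := fun h => by omega
    have h2 : (0:Int) ≥ k ∨ (0:Int) > n := Or.inl (by omega)
    rw [solution_103_4_2, if_neg h1, if_pos h2]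
  · rw [go_eq k n 11 0 0 [] 0 le_rfl (by omega) (by norm_num)]
    simp only [Int.sub_zero, zero_add]
    by_cases hk9 : 9 < k
    · rw [if_pos (Or.inr hk9)]
      have hlen : (PySem.List.pyRange 1 10 1).length < k.toNat := by
        rw [PySem.List.length_pyRange_one]; omega
      rw [pyCombinations_eq_nil_of_lt _ _ hlen]
      simp
    · rw [if_neg (by omega)]
      simp
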